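-- pv_equiv track=rewrite | github.com/nongfang55/review | source/data/service/DataSourceHelper.py | splitFileName
-- ===== SOURCE A (Python) =====
-- def splitFileName(name):
--     """
--     分词函数
--     分词规则：“actionpack／lib／action_view／helpers／form_helperrb：[“actionpack”,“actionpack／lib”,“actionpack／lib／action_view”]
--     @param name: 文件路径
--     @return:
--     """
--     # 初始化结果集
--     result = set()
--     # 获取filename中所有词汇
--     vocs = name.split("/")
--     # 按照论文规则拼接词汇
--     # 如“actionpack／lib／action_view／helpers／form_helperrb可分隔为：“actionpack”,“actionpack／lib”,“actionpack／lib／action_view”)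
--     tmp = ""
--     for voc in vocs:
--         tmp += "/" + voc
--         result.add(tmp)
--     return result
-- ===== SOURCE B (Python) =====
-- def splitFileName(name):
--     parts = name.split("/")
--     return {"/" + "/".join(parts[:i + 1]) for i in range(len(parts))}
-- ===== Notes on version B (the rewrite author's own statement) =====
-- stated objective: simpler
-- what changed: Replaces the running string accumulator and mutable set with a single set comprehension that recomputes each cumulative slash-prefixed prefix from a slice of the split parts list.
import Mathlib
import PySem

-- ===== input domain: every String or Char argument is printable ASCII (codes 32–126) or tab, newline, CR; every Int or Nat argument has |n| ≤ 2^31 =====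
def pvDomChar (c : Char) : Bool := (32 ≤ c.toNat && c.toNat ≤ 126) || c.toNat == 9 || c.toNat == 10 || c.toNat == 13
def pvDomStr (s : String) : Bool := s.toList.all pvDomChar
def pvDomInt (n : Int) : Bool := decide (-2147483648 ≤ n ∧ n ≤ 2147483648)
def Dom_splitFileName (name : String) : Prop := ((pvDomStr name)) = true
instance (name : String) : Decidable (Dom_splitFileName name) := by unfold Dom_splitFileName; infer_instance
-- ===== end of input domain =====

-- B replaces A's running string accumulator and mutable set with a set comprehension that
-- recomputes each cumulative prefix from a slice of the parts list (objective: simpler).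

-- ===== PORT A =====
-- name.split("/") with the literal nonempty separator "/": Str.split? is some here, so .getD [] is exact.
def splitFileName (name : String) : List String :=
  let vocs := (PySem.Str.split? name "/").getD []
  (vocs.foldl
    (fun (st : String × PySem.Set String) voc =>
      let tmp := st.1 ++ "/" ++ voc
      (tmp, PySem.Set.add st.2 tmp))
    ("", PySem.Set.empty)).2

-- ===== PORT B =====
def splitFileName_alt (name : String) : List String :=
  let parts := (PySem.Str.split? name "/").getD []
  PySem.Set.ofList
    ((PySem.List.pyRange 0 (parts.length : Int) 1).map
      (fun i => "/" ++ PySem.Str.join "/" (PySem.List.slice parts (some 0) (some (i + 1)))))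

-- ===== PRECONDITION & SPEC =====
def Spec_splitFileName (name : String) (out : List String) : Prop := out = splitFileName_alt name
instance (name : String) (out : List String) : Decidable (Spec_splitFileName name out) := by unfold Spec_splitFileName; infer_instance

-- ===== CLAIM (what is proved, stated in full; the proofs are below) =====
def Claim_equal_splitFileName : Prop := ∀ (name : String), Dom_splitFileName name → Spec_splitFileName name (splitFileName name)

-- ===== LEMMAS AND PROOFS =====

-- The list of cumulative prefixes A's loop adds, starting from accumulator tmp.
def prefA (tmp : String) : List String → List String
  | [] => []
  | v :: vs => (tmp ++ "/" ++ v) :: prefA (tmp ++ "/" ++ v) vs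

theorem len_step (tmp v : String) :
    PySem.Str.len (tmp ++ "/" ++ v) = PySem.Str.len tmp + 1 + PySem.Str.len v := by
  simp [PySem.Str.len_eq]
  omega

theorem foldA (vs : List String) (tmp : String) (acc : PySem.Set String)
    (h : ∀ s ∈ acc, PySem.Str.len s ≤ PySem.Str.len tmp) :
    ((vs.foldl
      (fun (st : String × PySem.Set String) voc =>
        (st.1 ++ "/" ++ voc, PySem.Set.add st.2 (st.1 ++ "/" ++ voc)))
      (tmp, acc))).2 = acc ++ prefA tmp vs := by
  induction vs generalizing tmp acc with
  | nil => simp [prefA]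
  | cons v vs ih =>
    have hv : (0:Int) ≤ PySem.Str.len v := by simp [PySem.Str.len_eq]
    have hnot : (tmp ++ "/" ++ v) ∉ acc := by
      intro hm
      have := h _ hm
      rw [len_step] at this
      omega
    simp only [List.foldl_cons]
    rw [PySem.Set.add_of_not_mem hnot]
    rw [ih _ _ (by
      intro s hs
      rcases List.mem_append.1 hs with hs | hs
      · have := h _ hs; rw [len_step]; omega
      · simp at hs; simp [hs])]
    simp [prefA]

theorem join_single (sep v : String) : PySem.Str.join sep [v] = v := by
  rw [← String.toList_inj, PySem.Str.toList_join]
  simp [PySem.Chars.join_singleton]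

theorem join_cons (sep v w : String) (l : List String) :
    PySem.Str.join sep (v :: w :: l) = v ++ sep ++ PySem.Str.join sep (w :: l) := by
  rw [← String.toList_inj, PySem.Str.toList_join]
  simp [PySem.Chars.join_cons_cons, PySem.Str.toList_join]

theorem prefB (vs : List String) (tmp : String) :
    prefA tmp vs =
      (List.range vs.length).map
        (fun k => tmp ++ "/" ++ PySem.Str.join "/" (vs.take (k + 1))) := by
  induction vs generalizing tmp with
  | nil => simp [prefA]
  | cons v vs ih =>
    simp only [prefA, List.length_cons, List.range_succ_eq_map, List.map_cons, List.map_map]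
    rw [List.cons_eq_cons]
    refine ⟨by simp [join_single], ?_⟩
    rw [ih (tmp ++ "/" ++ v)]
    apply List.map_congr_left
    intro k hk
    simp only [Function.comp, Nat.succ_eq_add_one]
    obtain ⟨w, rest, hw⟩ : ∃ w rest, vs.take (k + 1) = w :: rest := by
      rcases vs with _ | ⟨w, rest⟩
      · simp at hk
      · exact ⟨w, _, rfl⟩
    rw [show k + 1 + 1 = (k + 1) + 1 from rfl, List.take_succ_cons, hw, join_cons, ← hw]
    simp [String.append_assoc]

theorem lt_len_prefA (vs : List String) (tmp : String) :
    ∀ s ∈ prefA tmp vs, PySem.Str.len tmp < PySem.Str.len s := by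
  induction vs generalizing tmp with
  | nil => simp [prefA]
  | cons v vs ih =>
    intro s hs
    simp only [prefA, List.mem_cons] at hs
    have hv : (0:Int) ≤ PySem.Str.len v := by simp [PySem.Str.len_eq]
    rcases hs with rfl | hs
    · rw [len_step]; omega
    · have := ih (tmp ++ "/" ++ v) s hs
      rw [len_step] at this
      omega

theorem nodup_prefA (vs : List String) (tmp : String) : (prefA tmp vs).Nodup := by
  induction vs generalizing tmp with
  | nil => simp [prefA]
  | cons v vs ih =>
    refine List.nodup_cons.2 ⟨?_, ih _⟩
    intro hm
    have := lt_len_prefA vs (tmp ++ "/" ++ v) _ hm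
    omega

-- ===== VERDICT (by name: the statement is the Claim_ definition above) =====
theorem splitFileName_spec : Claim_equal_splitFileName := by
  intro name _
  unfold Spec_splitFileName splitFileName splitFileName_alt
  simp only []
  set parts := (PySem.Str.split? name "/").getD [] with hparts
  have hB :
      ((PySem.List.pyRange 0 (parts.length : Int) 1).map
        (fun i => "/" ++ PySem.Str.join "/" (PySem.List.slice parts (some 0) (some (i + 1))))) =
      prefA "" parts := by
    rw [PySem.List.pyRange_zero_natCast, List.map_map, prefB]
    apply List.map_congr_left
    intro k hk
    have : ((k : Int) + 1) = ((k + 1 : Nat) : Int) := by push_cast; ring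
    simp only [Function.comp, this, PySem.List.slice_zero_start, PySem.List.slice_to_natCast]
    rw [← String.toList_inj]
    simp
  rw [foldA parts "" PySem.Set.empty (by simp [PySem.Set.empty]), hB]
  simp only [PySem.Set.empty, List.nil_append]
  exact (PySem.Set.ofList_eq_self_of_nodup _ (nodup_prefA parts "")).symm
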